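-- pv_equiv track=rewrite | github.com/Realiserad/fish-ai | src/fish_ai/autocomplete.py | get_pipe
-- ===== SOURCE A (Python) =====
-- def get_pipe(buffer):
--     # strip the last process from the pipe
--     escape = False
--     string_char = None
--     pipe_pos = None
--     for i, char in enumerate(buffer):
--         if char == '\\':
--             escape = not escape
--             continue
--         if escape:
--             escape = False
--             continue
--         if char == "'" or char == '"':
--             if string_char is None:
--                 string_char = char
--             elif string_char == char:
--                 string_char = None
--             continue
--         if char == '|' and string_char is None:
--             pipe_pos = i
--     if pipe_pos is None:
--         # no pipe detected
--         return ''
--     buffer = buffer[:pipe_pos - 1]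
--     # start pipe at last unterminated paranthesis
--     escape = False
--     string_char = None
--     parens = [-1]
--     for i, char in enumerate(buffer):
--         if char == '\\':
--             escape = not escape
--             continue
--         if escape:
--             escape = False
--             continue
--         if char == "'" or char == '"':
--             if string_char is None:
--                 string_char = char
--             elif string_char == char:
--                 string_char = None
--             continue
--         if char == '(' and string_char is None:
--             parens.append(i)
--         elif char == ')' and string_char is None:
--             parens.pop()
--     return buffer[parens[-1] + 1:].strip()
-- ===== SOURCE B (Python) =====
-- def _active(buffer):
--     # yield (index, char) for characters outside string literals and not escaped
--     escape = False
--     string_char = None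
--     for i, char in enumerate(buffer):
--         if char == '\\':
--             escape = not escape
--         elif escape:
--             escape = False
--         elif char == "'" or char == '"':
--             if string_char is None:
--                 string_char = char
--             elif string_char == char:
--                 string_char = None
--         elif string_char is None:
--             yield i, char
--
--
-- def get_pipe(buffer):
--     # strip the last process from the pipe
--     pipe_pos = None
--     for i, char in _active(buffer):
--         if char == '|':
--             pipe_pos = i
--     if pipe_pos is None:
--         return ''
--     buffer = buffer[:pipe_pos - 1]
--     # last '(' not closed again before the pipe, found by a reverse
--     # scan with a depth counter instead of a stack
--     last_open = -1
--     depth = 0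
--     for i, char in reversed(list(_active(buffer))):
--         if char == ')':
--             depth += 1
--         elif char == '(':
--             if depth == 0:
--                 last_open = i
--                 break
--             depth -= 1
--     return buffer[last_open + 1:].strip()
-- ===== Notes on version B (the rewrite author's own statement) =====
-- stated objective: simpler
-- what changed: The duplicated escape/quote state machine is factored into one generator of active (index, char) pairs, and A's explicit parenthesis stack with a sentinel is replaced by a reverse scan with a depth counter that finds the last unclosed opening parenthesis directly.
import Mathlib
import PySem

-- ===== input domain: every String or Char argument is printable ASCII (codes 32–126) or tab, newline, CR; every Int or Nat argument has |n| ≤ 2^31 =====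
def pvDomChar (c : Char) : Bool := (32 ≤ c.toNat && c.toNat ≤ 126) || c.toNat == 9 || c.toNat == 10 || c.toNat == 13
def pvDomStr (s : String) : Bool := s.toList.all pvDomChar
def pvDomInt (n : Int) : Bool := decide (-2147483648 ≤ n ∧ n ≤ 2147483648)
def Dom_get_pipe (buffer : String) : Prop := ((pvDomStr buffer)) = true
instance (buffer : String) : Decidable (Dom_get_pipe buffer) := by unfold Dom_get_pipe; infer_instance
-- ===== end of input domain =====

-- B factors the duplicated escape/quote state machine into one active-character
-- scanner and replaces A's sentinel paren stack by a reverse scan with a depth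
-- counter (objective: simpler). Same return value wherever A returns (Pre_).

-- ===== PORT A =====

-- first loop of A: find the last '|' outside string literals
def pvA_loop1 : Bool → Option Char → Option Int → List (Int × Char) → Option Int
  | _, _, pp, [] => pp
  | esc, sc, pp, (i, c) :: rest =>
    if c = '\\' then pvA_loop1 (!esc) sc pp rest
    else if esc then pvA_loop1 false sc pp rest
    else if c = '\'' ∨ c = '"' then
      if sc = none then pvA_loop1 esc (some c) pp rest
      else if sc = some c then pvA_loop1 esc none pp rest
      else pvA_loop1 esc sc pp rest
    else if c = '|' ∧ sc = none then pvA_loop1 esc sc (some i) rest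
    else pvA_loop1 esc sc pp rest

-- second loop of A: the paren stack (Python order: append/pop at the end).
-- Python's parens.pop() raises IndexError on an empty list; dropLast [] = []
-- is only reached outside Pre_get_pipe.
def pvA_loop2 : Bool → Option Char → List Int → List (Int × Char) → List Int
  | _, _, parens, [] => parens
  | esc, sc, parens, (i, c) :: rest =>
    if c = '\\' then pvA_loop2 (!esc) sc parens rest
    else if esc then pvA_loop2 false sc parens rest
    else if c = '\'' ∨ c = '"' then
      if sc = none then pvA_loop2 esc (some c) parens rest
      else if sc = some c then pvA_loop2 esc none parens rest
      else pvA_loop2 esc sc parens rest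
    else if c = '(' ∧ sc = none then pvA_loop2 esc sc (parens ++ [i]) rest
    else if c = ')' ∧ sc = none then pvA_loop2 esc sc parens.dropLast rest
    else pvA_loop2 esc sc parens rest

def get_pipe (buffer : String) : String :=
  match pvA_loop1 false none none (PySem.List.enumerate buffer.toList) with
  | none => ""          -- no pipe detected
  | some pipePos =>
    let buf2 := PySem.Str.slice buffer none (some (pipePos - 1))
    let parens := pvA_loop2 false none [-1] (PySem.List.enumerate buf2.toList)
    match PySem.List.pyGet? parens (-1) with
    | none => ""        -- Python raises IndexError here; excluded by Pre_get_pipe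
    | some t => PySem.Str.strip (PySem.Str.slice buf2 (some (t + 1)) none)

-- ===== PORT B =====

-- Source B's _active generator: (index, char) pairs outside string literals, unescaped
def pvActive : Bool → Option Char → List (Int × Char) → List (Int × Char)
  | _, _, [] => []
  | esc, sc, (i, c) :: rest =>
    if c = '\\' then pvActive (!esc) sc rest
    else if esc then pvActive false sc rest
    else if c = '\'' ∨ c = '"' then
      if sc = none then pvActive esc (some c) rest
      else if sc = some c then pvActive esc none rest
      else pvActive esc sc rest
    else if sc = none then (i, c) :: pvActive esc sc rest
    else pvActive esc sc rest

-- Source B's reverse loop: depth counter over the reversed active pairs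
def pvB_back : List (Int × Char) → Int → Int
  | [], _ => -1
  | (i, c) :: rest, d =>
    if c = ')' then pvB_back rest (d + 1)
    else if c = '(' then (if d = 0 then i else pvB_back rest (d - 1))
    else pvB_back rest d

def get_pipe_alt (buffer : String) : String :=
  match List.foldl (fun pp (p : Int × Char) => if p.2 = '|' then some p.1 else pp) none
      (pvActive false none (PySem.List.enumerate buffer.toList)) with
  | none => ""
  | some pipePos =>
    let buf2 := PySem.Str.slice buffer none (some (pipePos - 1))
    let lastOpen := pvB_back (pvActive false none (PySem.List.enumerate buf2.toList)).reverse 0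
    PySem.Str.strip (PySem.Str.slice buf2 (some (lastOpen + 1)) none)

-- ===== PRECONDITION & SPEC =====

-- running balance and minimal prefix balance of the active parentheses
def pvBal (acts : List (Int × Char)) : Int × Int :=
  List.foldl (fun bm (p : Int × Char) =>
      if p.2 = '(' then (bm.1 + 1, min bm.2 (bm.1 + 1))
      else if p.2 = ')' then (bm.1 - 1, min bm.2 (bm.1 - 1)) else bm) (0, 0) acts

-- Pre_ excludes exactly the buffers on which A raises IndexError: those where,
-- before the last unquoted '|', the unquoted ')' outrun the '(' so that A's
-- sentinel stack pops an empty list or is empty at the end.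
def pvPre (buffer : String) : Bool :=
  match List.foldl (fun pp (p : Int × Char) => if p.2 = '|' then some p.1 else pp) none
      (pvActive false none (PySem.List.enumerate buffer.toList)) with
  | none => true
  | some pipePos =>
    let bm := pvBal (pvActive false none
        (PySem.List.enumerate (PySem.Str.slice buffer none (some (pipePos - 1))).toList))
    decide (-1 ≤ bm.2 ∧ bm.1 ≠ -1)

def Pre_get_pipe (buffer : String) : Prop := pvPre buffer = true
instance (buffer : String) : Decidable (Pre_get_pipe buffer) := by unfold Pre_get_pipe; infer_instance

def pvWitness_get_pipe : String := "x; (a | b) | c"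

def Spec_get_pipe (buffer : String) (out : String) : Prop := out = get_pipe_alt buffer
instance (buffer : String) (out : String) : Decidable (Spec_get_pipe buffer out) := by unfold Spec_get_pipe; infer_instance

-- ===== CLAIM (what is proved, stated in full; the proofs are below) =====
def Claim_equal_get_pipe : Prop := ∀ (buffer : String), Dom_get_pipe buffer → Pre_get_pipe buffer → Spec_get_pipe buffer (get_pipe buffer)

-- ===== LEMMAS AND PROOFS =====

-- A's first loop is the pick-last-'|' fold over the active pairs
theorem pvA_loop1_eq_fold (chars : List (Int × Char)) : ∀ (esc : Bool) (sc : Option Char) (pp : Option Int),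
    pvA_loop1 esc sc pp chars =
      List.foldl (fun pp (p : Int × Char) => if p.2 = '|' then some p.1 else pp) pp (pvActive esc sc chars) := by
  induction chars with
  | nil => intro esc sc pp; rfl
  | cons hd tl ih =>
    intro esc sc pp
    obtain ⟨i, c⟩ := hd
    simp only [pvA_loop1, pvActive]
    by_cases h1 : c = '\\'
    · simp only [if_pos h1]; exact ih ..
    simp only [if_neg h1]
    by_cases h2 : esc = true
    · simp only [if_pos h2]; exact ih ..
    simp only [if_neg h2]
    by_cases h3 : c = '\'' ∨ c = '"'
    · simp only [if_pos h3]
      by_cases h4 : sc = none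
      · simp only [if_pos h4]; exact ih ..
      simp only [if_neg h4]
      by_cases h5 : sc = some c
      · simp only [if_pos h5]; exact ih ..
      · simp only [if_neg h5]; exact ih ..
    simp only [if_neg h3]
    by_cases hsc : sc = none
    · by_cases hc : c = '|'
      · rw [if_pos (show c = '|' ∧ sc = none from ⟨hc, hsc⟩), if_pos hsc, List.foldl_cons,
          if_pos (show ((i, c) : Int × Char).2 = '|' from hc)]
        exact ih ..
      · rw [if_neg (show ¬ (c = '|' ∧ sc = none) from fun h => hc h.1), if_pos hsc,
          List.foldl_cons, if_neg (show ¬ ((i, c) : Int × Char).2 = '|' from hc)]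
        exact ih ..
    · rw [if_neg (show ¬ (c = '|' ∧ sc = none) from fun h => hsc h.2), if_neg hsc]
      exact ih ..

-- A's second loop is the stack fold over the active pairs
theorem pvA_loop2_eq_fold (chars : List (Int × Char)) : ∀ (esc : Bool) (sc : Option Char) (s : List Int),
    pvA_loop2 esc sc s chars =
      List.foldl (fun s (p : Int × Char) =>
        if p.2 = '(' then s ++ [p.1] else if p.2 = ')' then s.dropLast else s) s (pvActive esc sc chars) := by
  induction chars with
  | nil => intro esc sc s; rfl
  | cons hd tl ih =>
    intro esc sc s
    obtain ⟨i, c⟩ := hd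
    simp only [pvA_loop2, pvActive]
    by_cases h1 : c = '\\'
    · simp only [if_pos h1]; exact ih ..
    simp only [if_neg h1]
    by_cases h2 : esc = true
    · simp only [if_pos h2]; exact ih ..
    simp only [if_neg h2]
    by_cases h3 : c = '\'' ∨ c = '"'
    · simp only [if_pos h3]
      by_cases h4 : sc = none
      · simp only [if_pos h4]; exact ih ..
      simp only [if_neg h4]
      by_cases h5 : sc = some c
      · simp only [if_pos h5]; exact ih ..
      · simp only [if_neg h5]; exact ih ..
    simp only [if_neg h3]
    by_cases hsc : sc = none
    · rw [if_pos hsc, List.foldl_cons]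
      by_cases ho : c = '('
      · rw [if_pos (show c = '(' ∧ sc = none from ⟨ho, hsc⟩),
          if_pos (show ((i, c) : Int × Char).2 = '(' from ho)]
        exact ih ..
      have hno : ¬ (c = '(' ∧ sc = none) := fun h => ho h.1
      by_cases hcl : c = ')'
      · rw [if_neg hno, if_pos (show c = ')' ∧ sc = none from ⟨hcl, hsc⟩),
          if_neg (show ¬ ((i, c) : Int × Char).2 = '(' from ho),
          if_pos (show ((i, c) : Int × Char).2 = ')' from hcl)]
        exact ih ..
      · rw [if_neg hno, if_neg (show ¬ (c = ')' ∧ sc = none) from fun h => hcl h.1),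
          if_neg (show ¬ ((i, c) : Int × Char).2 = '(' from ho),
          if_neg (show ¬ ((i, c) : Int × Char).2 = ')' from hcl)]
        exact ih ..
    · rw [if_neg (show ¬ (c = '(' ∧ sc = none) from fun h => hsc h.2),
        if_neg (show ¬ (c = ')' ∧ sc = none) from fun h => hsc h.2), if_neg hsc]
      exact ih ..

-- the Python-order stack fold, rewritten with the top at the head
theorem stack_fold_reverse (acts : List (Int × Char)) : ∀ (s : List Int),
    List.foldl (fun s (p : Int × Char) =>
        if p.2 = '(' then s ++ [p.1] else if p.2 = ')' then s.dropLast else s) s acts =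
      (List.foldl (fun s (p : Int × Char) =>
        if p.2 = '(' then p.1 :: s else if p.2 = ')' then s.tail else s) s.reverse acts).reverse := by
  induction acts with
  | nil => intro s; simp
  | cons hd tl ih =>
    intro s
    simp only [List.foldl_cons]
    split_ifs <;> rw [ih]
    · simp
    · rw [List.tail_reverse]

-- sum-valued reverse scan: found index, or leftover depth at exhaustion
def pvBackAux : List (Int × Char) → Int → Int ⊕ Int
  | [], d => .inr d
  | (i, c) :: rest, d =>
    if c = ')' then pvBackAux rest (d + 1)
    else if c = '(' then (if d = 0 then .inl i else pvBackAux rest (d - 1))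
    else pvBackAux rest d

theorem pvB_back_eq_aux (rs : List (Int × Char)) : ∀ d, pvB_back rs d =
    (match pvBackAux rs d with | .inl i => i | .inr _ => -1) := by
  induction rs with
  | nil => intro d; rfl
  | cons hd tl ih =>
    intro d
    obtain ⟨i, c⟩ := hd
    simp only [pvB_back, pvBackAux]
    split_ifs <;> simp [ih]

-- key lemma: entry d of the head-top stack after the forward fold is what the
-- reverse scan finds at depth d (or an entry of the initial stack)
theorem stack_get_eq_back (rs : List (Int × Char)) : ∀ (s : List Int) (d : Int), 0 ≤ d →
    (List.foldl (fun s (p : Int × Char) =>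
        if p.2 = '(' then p.1 :: s else if p.2 = ')' then s.tail else s) s rs.reverse)[d.toNat]? =
      (match pvBackAux rs d with | .inl i => some i | .inr d' => s[d'.toNat]?) := by
  induction rs with
  | nil => intro s d _; rfl
  | cons hd tl ih =>
    intro s d hd0
    obtain ⟨i, c⟩ := hd
    simp only [List.reverse_cons, List.foldl_append, List.foldl_cons, List.foldl_nil, pvBackAux]
    by_cases h1 : c = ')'
    · rw [if_pos (show ((i, c) : Int × Char).2 = ')' from h1), if_pos h1,
        if_neg (show ¬ ((i, c) : Int × Char).2 = '(' from by simp [h1])]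
      rw [List.getElem?_tail, show d.toNat + 1 = (d + 1).toNat from by omega]
      exact ih s (d + 1) (by omega)
    by_cases h2 : c = '('
    · rw [if_pos (show ((i, c) : Int × Char).2 = '(' from h2), if_neg h1, if_pos h2]
      by_cases h3 : d = 0
      · rw [if_pos h3, h3]
        simp
      · rw [if_neg h3]
        rw [show d.toNat = (d - 1).toNat + 1 from by omega, List.getElem?_cons_succ]
        exact ih s (d - 1) (by omega)
    · rw [if_neg (show ¬ ((i, c) : Int × Char).2 = '(' from h2),
        if_neg (show ¬ ((i, c) : Int × Char).2 = ')' from h1), if_neg h1, if_neg h2]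
      exact ih s d hd0

-- in the exhausted case the leftover depth is d minus the paren balance
theorem pvBackAux_inr_bal (rs : List (Int × Char)) : ∀ d d', pvBackAux rs d = .inr d' →
    d' = d - ((rs.countP (fun p => p.2 = '(')) - (rs.countP (fun p => p.2 = ')'))) := by
  induction rs with
  | nil => intro d d' h; simp only [pvBackAux] at h; cases h; simp
  | cons hd tl ih =>
    intro d d' h
    obtain ⟨i, c⟩ := hd
    simp only [pvBackAux] at h
    split_ifs at h with h1 h2 h3
    · have hih := ih (d + 1) d' h
      simp [List.countP_cons, h1] <;> omega
    · have hih := ih (d - 1) d' h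
      simp [List.countP_cons, h2] <;> omega
    · have hih := ih d d' h
      simp [List.countP_cons, h1, h2] <;> omega

-- the first component of pvBal is the paren balance
theorem pvBal_fst (acts : List (Int × Char)) : ∀ (b m : Int),
    (List.foldl (fun bm (p : Int × Char) =>
      if p.2 = '(' then (bm.1 + 1, min bm.2 (bm.1 + 1))
      else if p.2 = ')' then (bm.1 - 1, min bm.2 (bm.1 - 1)) else bm) (b, m) acts).1 =
      b + ((acts.countP (fun p => p.2 = '(')) - (acts.countP (fun p => p.2 = ')'))) := by
  induction acts with
  | nil => intro b m; simp
  | cons hd tl ih =>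
    intro b m
    obtain ⟨i, c⟩ := hd
    simp only [List.foldl_cons]
    split_ifs with h1 h2
    · simp [ih, List.countP_cons, h1, (by decide : ¬ ('(' : Char) = ')')] <;> omega
    · simp [ih, List.countP_cons, h2, (by decide : ¬ (')' : Char) = '(')] <;> omega
    · simp [ih, List.countP_cons, h1, h2] <;> omega

-- the minimum component never exceeds the balance component
theorem pvBal_min_le (acts : List (Int × Char)) : ∀ (b m : Int), m ≤ b →
    (List.foldl (fun bm (p : Int × Char) =>
      if p.2 = '(' then (bm.1 + 1, min bm.2 (bm.1 + 1))
      else if p.2 = ')' then (bm.1 - 1, min bm.2 (bm.1 - 1)) else bm) (b, m) acts).2 ≤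
    (List.foldl (fun bm (p : Int × Char) =>
      if p.2 = '(' then (bm.1 + 1, min bm.2 (bm.1 + 1))
      else if p.2 = ')' then (bm.1 - 1, min bm.2 (bm.1 - 1)) else bm) (b, m) acts).1 := by
  induction acts with
  | nil => intro b m h; simpa
  | cons hd tl ih =>
    intro b m h
    obtain ⟨i, c⟩ := hd
    simp only [List.foldl_cons]
    split_ifs <;> apply ih <;> omega

theorem pvBackAux_inr_nonneg (rs : List (Int × Char)) : ∀ d d', 0 ≤ d → pvBackAux rs d = .inr d' → 0 ≤ d' := by
  induction rs with
  | nil => intro d d' h0 h; simp only [pvBackAux] at h; cases h; exact h0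
  | cons hd tl ih =>
    intro d d' h0 h
    obtain ⟨i, c⟩ := hd
    simp only [pvBackAux] at h
    split_ifs at h with h1 h2 h3
    · exact ih (d + 1) d' (by omega) h
    · exact ih (d - 1) d' (by omega) h
    · exact ih d d' h0 h

-- under Pre_'s balance condition the stack top is what B's reverse scan returns
theorem top_eq (acts : List (Int × Char))
    (h : -1 ≤ (pvBal acts).2 ∧ (pvBal acts).1 ≠ -1) :
    (List.foldl (fun s (p : Int × Char) =>
        if p.2 = '(' then p.1 :: s else if p.2 = ')' then s.tail else s) ([-1] : List Int) acts).head? =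
      some (pvB_back acts.reverse 0) := by
  have key := stack_get_eq_back acts.reverse ([-1] : List Int) 0 le_rfl
  rw [List.reverse_reverse] at key
  rw [show ((0 : Int)).toNat = 0 from rfl] at key
  rw [List.head?_eq_getElem?, key, pvB_back_eq_aux]
  cases hb : pvBackAux acts.reverse 0 with
  | inl i => rfl
  | inr d' =>
    have hbal := pvBackAux_inr_bal acts.reverse 0 d' hb
    rw [List.countP_reverse, List.countP_reverse] at hbal
    have hnn := pvBackAux_inr_nonneg acts.reverse 0 d' le_rfl hb
    have hfst := pvBal_fst acts 0 0
    have hmin := pvBal_min_le acts 0 0 le_rfl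
    obtain ⟨hm, hne⟩ := h
    unfold pvBal at hm hne
    have hd0 : d' = 0 := by rw [hfst] at hne hmin; omega
    subst hd0
    rfl

-- ===== VERDICT (by name: the statement is the Claim_ definition above) =====
theorem get_pipe_spec : Claim_equal_get_pipe := by
  intro buffer _ hpre
  unfold Spec_get_pipe get_pipe get_pipe_alt
  rw [pvA_loop1_eq_fold]
  cases hp : List.foldl (fun pp (p : Int × Char) => if p.2 = '|' then some p.1 else pp) none
      (pvActive false none (PySem.List.enumerate buffer.toList)) with
  | none => rfl
  | some pipePos =>
    simp only []
    rw [pvA_loop2_eq_fold, stack_fold_reverse,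
      show ([-1] : List Int).reverse = [-1] from rfl,
      PySem.List.pyGet?_neg_one, List.getLast?_reverse]
    unfold Pre_get_pipe pvPre at hpre
    rw [hp] at hpre
    simp only [decide_eq_true_eq] at hpre
    rw [top_eq _ hpre]
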